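-- pv_equiv track=rewrite | github.com/fuchslukas00/daily-media-briefing | script_v1.py | story_title_for_cluster
-- ===== SOURCE A (Python) =====
-- def story_title_for_cluster(cluster: list[dict]) -> str:
--     """
--     v1 heuristic: choose the 'best' title among cluster items.
--     Prefer a title that is descriptive (not too short) and from a major source doesn't matter.
--     """
--     # If only one item, return its title.
--     if len(cluster) == 1:
--         return cluster[0].get("title") or "Untitled story"
--
--     # Choose longest reasonable title (often most descriptive)
--     titles = [(it.get("title") or "").strip() for it in cluster]
--     titles = [t for t in titles if t]
--     if not titles:
--         return "Untitled story"
--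
--     # Avoid extremely long titles if present
--     titles_sorted = sorted(titles, key=lambda t: (min(len(t), 120), len(t)), reverse=True)
--     return titles_sorted[0]
-- ===== SOURCE B (Python) =====
-- def story_title_for_cluster(cluster: list[dict]) -> str:
--     # One explicit pass keeping the best title seen so far (strictly-longer wins,
--     # so the first longest title is kept, matching A's stable descending sort):
--     # no intermediate title lists, no sort.
--     if len(cluster) == 1:
--         return cluster[0].get("title") or "Untitled story"
--     best = None
--     for it in cluster:
--         t = (it.get("title") or "").strip()
--         if t and (best is None or len(t) > len(best)):
--             best = t
--     return best if best is not None else "Untitled story"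
-- ===== Notes on version B (the rewrite author's own statement) =====
-- stated objective: simpler
-- what changed: Replaces A's build-list, filter, decorate-sort-descending-by-(min(len,120),len)-then-take-first with a single explicit loop over the cluster that keeps the first strictly-longest stripped non-empty title in an accumulator (the tuple key orders exactly like plain length, and strictly-greater updates reproduce the stable sort's first-maximal tie-break).
import Mathlib
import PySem

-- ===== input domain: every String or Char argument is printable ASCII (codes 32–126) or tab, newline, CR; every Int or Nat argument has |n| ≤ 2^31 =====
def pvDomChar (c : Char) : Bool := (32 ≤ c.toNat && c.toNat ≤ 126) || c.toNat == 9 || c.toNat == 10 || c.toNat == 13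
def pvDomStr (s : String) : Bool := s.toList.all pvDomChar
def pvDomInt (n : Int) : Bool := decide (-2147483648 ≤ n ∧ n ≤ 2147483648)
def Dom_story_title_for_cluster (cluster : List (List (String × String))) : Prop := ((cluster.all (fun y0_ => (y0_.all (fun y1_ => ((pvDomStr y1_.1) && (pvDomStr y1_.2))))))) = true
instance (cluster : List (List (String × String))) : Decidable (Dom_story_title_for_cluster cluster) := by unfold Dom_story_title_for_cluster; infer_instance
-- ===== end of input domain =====

-- B replaces A's full descending sort + take-first by one explicit pass keeping the
-- best (first strictly-longest) stripped non-empty title in an accumulator; objective: simpler.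

set_option maxRecDepth 4000


-- Python's `v or d` for an optional string v: d when v is None or "".
def pyOrStr (v : Option String) (d : String) : String :=
  match v with
  | none => d
  | some s => if s = "" then d else s

-- ===== PORT A =====
def story_title_for_cluster (cluster : List (List (String × String))) : String :=
  if cluster.length = 1 then
    -- cluster[0] is safe here (length = 1), so headD [] is exact
    pyOrStr (((cluster.headD []).lookup "title")) "Untitled story"
  else
    let titles := cluster.map (fun it => PySem.Str.strip (pyOrStr ((it.lookup "title")) ""))
    let titles2 := titles.filter (fun t => decide (t ≠ ""))
    if titles2 = [] then "Untitled story"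
    else
      -- titles_sorted[0] is safe here (titles2 nonempty), so headD "" is exact
      (PySem.List.sorted2 titles2 (fun t => min (PySem.Str.len t) 120) (fun t => PySem.Str.len t) true).headD ""

-- ===== PORT B =====
-- B's loop body: update the accumulator when the stripped title is non-empty and
-- strictly longer than the best so far (or there is no best yet).
def bestStep (best : Option String) (it : List (String × String)) : Option String :=
  let t := PySem.Str.strip (pyOrStr ((it.lookup "title")) "")
  if t = "" then best
  else
    match best with
    | none => some t
    | some b => if PySem.Str.len b < PySem.Str.len t then some t else some b

def story_title_for_cluster_alt (cluster : List (List (String × String))) : String :=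
  if cluster.length = 1 then
    pyOrStr (((cluster.headD []).lookup "title")) "Untitled story"
  else
    match cluster.foldl bestStep none with
    | none => "Untitled story"
    | some b => b

-- ===== PRECONDITION & SPEC =====
def Spec_story_title_for_cluster (cluster : List (List (String × String))) (out : String) : Prop := out = story_title_for_cluster_alt cluster
instance (cluster : List (List (String × String))) (out : String) : Decidable (Spec_story_title_for_cluster cluster out) := by unfold Spec_story_title_for_cluster; infer_instance

-- ===== CLAIM (what is proved, stated in full; the proofs are below) =====
def Claim_equal_story_title_for_cluster : Prop := ∀ (cluster : List (List (String × String))), Dom_story_title_for_cluster cluster → Spec_story_title_for_cluster cluster (story_title_for_cluster cluster)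

-- ===== LEMMAS AND PROOFS =====

-- B's single pass computes Python's max (first maximal element by length) of A's
-- filtered title list.
theorem foldl_bestStep_eq_max? (cluster : List (List (String × String))) :
    ∀ acc : Option String,
      cluster.foldl bestStep acc
      = ((cluster.map (fun it => PySem.Str.strip (pyOrStr ((it.lookup "title")) ""))).filter
          (fun t => decide (t ≠ ""))).foldl
          (fun o t => match o with
            | none => some t
            | some m => if PySem.Str.len m < PySem.Str.len t then some t else some m) acc := by
  induction cluster with
  | nil => intro acc; rfl
  | cons it cl ih =>
    intro acc
    rw [List.foldl_cons, ih, List.map_cons, List.filter_cons]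
    by_cases h : PySem.Str.strip (pyOrStr ((it.lookup "title")) "") = ""
    · have hd : (decide (PySem.Str.strip (pyOrStr ((it.lookup "title")) "") ≠ "")) = false := by
        simp [h]
      rw [hd]
      simp only [Bool.false_eq_true, if_false]
      congr 1
      simp [bestStep, h]
    · have hd : (decide (PySem.Str.strip (pyOrStr ((it.lookup "title")) "") ≠ "")) = true := by
        simp [h]
      rw [hd, if_pos rfl, List.foldl_cons]
      congr 1
      have hstep : bestStep acc it
          = (match acc with
            | none => some (PySem.Str.strip (pyOrStr ((it.lookup "title")) ""))
            | some m => if PySem.Str.len m < PySem.Str.len (PySem.Str.strip (pyOrStr ((it.lookup "title")) ""))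
                then some (PySem.Str.strip (pyOrStr ((it.lookup "title")) "")) else some m) := by
        simp only [bestStep]
        rw [if_neg h]
      rw [hstep]

-- head? of a stable insertion fold is the running first-maximum.
theorem head?_foldl_insertBy {α : Type} (before : α → α → Bool) (ts : List α) :
    ∀ acc : List α,
      (ts.foldl (fun a x => PySem.List.insertBy before x a) acc).head? =
      ts.foldl (fun o x => match o with
        | none => some x
        | some m => if before x m then some x else some m) acc.head? := by
  induction ts with
  | nil => intro acc; rfl
  | cons x ts ih =>
    intro acc
    simp only [List.foldl_cons]
    rw [ih]
    congr 1
    cases acc with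
    | nil => rfl
    | cons y ys =>
      simp only [PySem.List.insertBy]
      by_cases h : before x y = true <;> simp [h]

-- head of sorted(reverse=True) is Python's max (first maximal element).
theorem head?_sorted_rev_eq_max? {α κ : Type} [LT κ] [DecidableLT κ]
    (ts : List α) (key : α → κ) :
    (PySem.List.sorted ts key true).head? = PySem.List.max? ts key := by
  unfold PySem.List.sorted PySem.List.max?
  simp only [if_pos rfl]
  rw [head?_foldl_insertBy]
  simp only [List.head?_nil]
  congr 1
  funext o x
  cases o with
  | none => rfl
  | some m => by_cases h : key m < key x <;> simp [h]

-- A's tuple key (min(len,120), len) compares (lexicographically, Python-style) exactly like len.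
theorem sorted2_key_eq_sorted_len (ts : List String) :
    PySem.List.sorted2 ts (fun t => min (PySem.Str.len t) 120) (fun t => PySem.Str.len t) true
    = PySem.List.sorted ts PySem.Str.len true := by
  have key : ∀ x y : Int, (decide (min y 120 < min x 120) ||
      (!decide (min x 120 < min y 120) && decide (y < x))) = decide (y < x) := by
    intro x y
    by_cases h : y < x
    · by_cases h1 : min y 120 < min x 120
      · simp [h, h1]
      · have h2 : ¬ min x 120 < min y 120 := by omega
        simp [h, h1, h2]
    · have h1 : ¬ min y 120 < min x 120 := by omega
      simp [h, h1]
  have hcmp : (fun a b : String =>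
      (decide (min (PySem.Str.len b) 120 < min (PySem.Str.len a) 120) ||
        (!decide (min (PySem.Str.len a) 120 < min (PySem.Str.len b) 120) &&
          decide (PySem.Str.len b < PySem.Str.len a))))
      = (fun a b : String => decide (PySem.Str.len b < PySem.Str.len a)) := by
    funext a b
    exact key (PySem.Str.len a) (PySem.Str.len b)
  show ts.foldl (fun acc x => PySem.List.insertBy (fun a b =>
      (decide (min (PySem.Str.len b) 120 < min (PySem.Str.len a) 120) ||
        (!decide (min (PySem.Str.len a) 120 < min (PySem.Str.len b) 120) &&
          decide (PySem.Str.len b < PySem.Str.len a)))) x acc) []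
    = ts.foldl (fun acc x => PySem.List.insertBy (fun a b =>
        decide (PySem.Str.len b < PySem.Str.len a)) x acc) []
  rw [hcmp]

-- ===== VERDICT (by name: the statement is the Claim_ definition above) =====
theorem story_title_for_cluster_spec : Claim_equal_story_title_for_cluster := by
  intro cluster _
  unfold Spec_story_title_for_cluster story_title_for_cluster story_title_for_cluster_alt
  by_cases h1 : cluster.length = 1
  · rw [if_pos h1, if_pos h1]
  · rw [if_neg h1, if_neg h1]
    rw [foldl_bestStep_eq_max? cluster none]
    set ts := ((cluster.map (fun it => PySem.Str.strip (pyOrStr ((it.lookup "title")) ""))).filter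
        (fun t => decide (t ≠ ""))) with hts
    have hmax : ts.foldl (fun o t => match o with
        | none => some t
        | some m => if PySem.Str.len m < PySem.Str.len t then some t else some m) none
        = PySem.List.max? ts PySem.Str.len := by
      unfold PySem.List.max?
      congr 1
      funext o t
      cases o <;> rfl
    rw [hmax]
    by_cases h2 : ts = []
    · rw [if_pos h2, h2]; rfl
    · rw [if_neg h2]
      rw [sorted2_key_eq_sorted_len, List.headD_eq_head?_getD, head?_sorted_rev_eq_max?]
      rcases ho : PySem.List.max? ts PySem.Str.len with _ | b
      · exact absurd ((PySem.List.max?_eq_none_iff _ _).mp ho) h2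
      · rfl
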